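-- pv_equiv track=rewrite | github.com/TTTThanh2812/CS112.M21.KHCL | Bài tập WeCode/Chủ đề 4 - Nhóm 3/Solution.py | isRobotSafe
-- ===== SOURCE A (Python) =====
-- def moving(x, y, char):
--     if char == 'L':
--         y -= 1
--     elif char == 'R':
--         y += 1
--     elif char == 'U':
--         x -= 1
--     elif char == 'D':
--         x += 1
--     return x, y
--
-- def isRobotSafe(rowNum, columnNum, string):
--     count = 0
--     for row in range(rowNum):
--         for column in range(columnNum):
--             x, y = row, column
--             for index in range(len(string)):
--                 x, y = moving(x, y, string[index])
--                 if x not in range(rowNum) or y not in range(columnNum):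
--                     count += 1
--                     break
--     if count == rowNum * columnNum:
--         return False
--     return True
-- ===== SOURCE B (Python) =====
-- def isRobotSafe(rowNum, columnNum, string):
--     # One pass over the moves: track cumulative offsets and their running extremes.
--     # A starting cell is safe iff the whole swept rectangle fits inside the grid,
--     # which happens for some cell iff each span is smaller than the grid dimension.
--     x = y = 0
--     min_x = max_x = min_y = max_y = 0
--     for ch in string:
--         if ch == 'U':
--             x -= 1
--         elif ch == 'D':
--             x += 1
--         elif ch == 'L':
--             y -= 1
--         elif ch == 'R':
--             y += 1
--         min_x = min(min_x, x)
--         max_x = max(max_x, x)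
--         min_y = min(min_y, y)
--         max_y = max(max_y, y)
--     return rowNum > max_x - min_x and columnNum > max_y - min_y
-- ===== Notes on version B (the rewrite author's own statement) =====
-- stated objective: faster
-- what changed: Replaces the per-start simulation (every grid cell walks the whole move string) by a single pass over the string tracking running min/max cumulative row/column offsets (a safe start exists iff each offset span is smaller than the grid dimension); Pre_ excludes grids with a negative dimension, which are outside the function's natural domain (dimensions are counts) and on which neither answer is specified.
-- outside the precondition, e.g. on isRobotSafe(-1, 1, ''): A returns True, B returns False
import Mathlib
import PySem

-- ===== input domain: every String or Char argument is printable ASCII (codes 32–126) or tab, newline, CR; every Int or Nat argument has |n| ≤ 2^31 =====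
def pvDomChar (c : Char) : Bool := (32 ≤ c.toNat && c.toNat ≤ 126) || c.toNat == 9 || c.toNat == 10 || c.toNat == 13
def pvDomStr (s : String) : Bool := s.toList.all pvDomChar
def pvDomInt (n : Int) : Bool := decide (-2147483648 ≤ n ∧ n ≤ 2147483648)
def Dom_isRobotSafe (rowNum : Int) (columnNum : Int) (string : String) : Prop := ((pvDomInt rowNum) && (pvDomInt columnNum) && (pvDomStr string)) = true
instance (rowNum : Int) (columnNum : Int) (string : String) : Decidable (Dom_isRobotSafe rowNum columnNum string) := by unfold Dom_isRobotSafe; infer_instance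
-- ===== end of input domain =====

-- B replaces A's per-start O(R*C*N) simulation by one O(N) pass over the moves
-- tracking running min/max cumulative offsets (objective: faster, asymptotic).

-- ===== PORT A =====
def moving (x : Int) (y : Int) (c : Char) : Int × Int :=
  if c == 'L' then (x, y - 1)
  else if c == 'R' then (x, y + 1)
  else if c == 'U' then (x - 1, y)
  else if c == 'D' then (x + 1, y)
  else (x, y)

-- A's inner 'for index in range(len(string)) … break': returns true iff the walk from
-- (x, y) leaves the grid at some step (the 'count += 1; break' branch fires).
def escapes (rowNum : Int) (columnNum : Int) (x : Int) (y : Int) : List Char → Bool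
  | [] => false
  | c :: rest =>
    let p := moving x y c
    if ¬(0 ≤ p.1 ∧ p.1 < rowNum) ∨ ¬(0 ≤ p.2 ∧ p.2 < columnNum) then true
    else escapes rowNum columnNum p.1 p.2 rest

def isRobotSafe (rowNum : Int) (columnNum : Int) (string : String) : Bool :=
  let count : Int := (PySem.List.pyRange 0 rowNum 1).foldl (fun cnt row =>
      (PySem.List.pyRange 0 columnNum 1).foldl (fun cnt col =>
        if escapes rowNum columnNum row col string.toList then cnt + 1 else cnt) cnt) 0
  if count == rowNum * columnNum then false else true

-- ===== PORT B =====
structure BState where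
  x : Int
  y : Int
  mnx : Int
  mxx : Int
  mny : Int
  mxy : Int
deriving Repr, DecidableEq

def stepB (s : BState) (c : Char) : BState :=
  let x := if c == 'U' then s.x - 1 else if c == 'D' then s.x + 1 else s.x
  let y := if c == 'L' then s.y - 1 else if c == 'R' then s.y + 1 else s.y
  ⟨x, y, min s.mnx x, max s.mxx x, min s.mny y, max s.mxy y⟩

def isRobotSafe_alt (rowNum : Int) (columnNum : Int) (string : String) : Bool :=
  let s := string.toList.foldl stepB ⟨0, 0, 0, 0, 0, 0⟩
  decide (s.mxx - s.mnx < rowNum ∧ s.mxy - s.mny < columnNum)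

-- ===== PRECONDITION & SPEC =====
-- Pre_ excludes grids with a negative dimension: a negative row or column count is
-- outside the function's natural domain (dimensions are counts), describes no grid,
-- and neither program's answer is specified there.
def Pre_isRobotSafe (rowNum : Int) (columnNum : Int) (string : String) : Prop :=
  0 ≤ rowNum ∧ 0 ≤ columnNum
instance (rowNum : Int) (columnNum : Int) (string : String) : Decidable (Pre_isRobotSafe rowNum columnNum string) := by unfold Pre_isRobotSafe; infer_instance
def pvWitness_isRobotSafe : Int × Int × String := (2, 2, "RD")

def Spec_isRobotSafe (rowNum : Int) (columnNum : Int) (string : String) (out : Bool) : Prop := out = isRobotSafe_alt rowNum columnNum string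
instance (rowNum : Int) (columnNum : Int) (string : String) (out : Bool) : Decidable (Spec_isRobotSafe rowNum columnNum string out) := by unfold Spec_isRobotSafe; infer_instance

-- ===== CLAIM (what is proved, stated in full; the proofs are below) =====
def Claim_equal_isRobotSafe : Prop := ∀ (rowNum : Int) (columnNum : Int) (string : String), Dom_isRobotSafe rowNum columnNum string → Pre_isRobotSafe rowNum columnNum string → Spec_isRobotSafe rowNum columnNum string (isRobotSafe rowNum columnNum string)

-- ===== LEMMAS AND PROOFS =====

-- Cumulative-offset extremes of all prefixes (including the empty prefix) of a move list.
def extS : List Char → BState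
  | [] => ⟨0, 0, 0, 0, 0, 0⟩
  | c :: cs =>
    let d := moving 0 0 c
    let e := extS cs
    ⟨d.1 + e.x, d.2 + e.y, min 0 (d.1 + e.mnx), max 0 (d.1 + e.mxx),
     min 0 (d.2 + e.mny), max 0 (d.2 + e.mxy)⟩

theorem moving_delta (x y : Int) (c : Char) :
    moving x y c = (x + (moving 0 0 c).1, y + (moving 0 0 c).2) := by
  unfold moving
  split_ifs <;> simp [Prod.ext_iff] <;> omega

theorem ext_bounds (cs : List Char) :
    (extS cs).mnx ≤ 0 ∧ 0 ≤ (extS cs).mxx ∧ (extS cs).mnx ≤ (extS cs).x ∧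
    (extS cs).x ≤ (extS cs).mxx ∧ (extS cs).mny ≤ 0 ∧ 0 ≤ (extS cs).mxy ∧
    (extS cs).mny ≤ (extS cs).y ∧ (extS cs).y ≤ (extS cs).mxy := by
  induction cs with
  | nil => simp [extS]
  | cons c cs ih => simp only [extS]; omega

theorem stepB_eq (dx dy mnx mxx mny mxy : Int) (c : Char) :
    stepB ⟨dx, dy, mnx, mxx, mny, mxy⟩ c =
      ⟨dx + (moving 0 0 c).1, dy + (moving 0 0 c).2,
       min mnx (dx + (moving 0 0 c).1), max mxx (dx + (moving 0 0 c).1),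
       min mny (dy + (moving 0 0 c).2), max mxy (dy + (moving 0 0 c).2)⟩ := by
  unfold stepB moving
  split_ifs <;> simp_all [BState.mk.injEq] <;> omega

theorem foldl_stepB (cs : List Char) : ∀ dx dy mnx mxx mny mxy : Int,
    mnx ≤ dx → dx ≤ mxx → mny ≤ dy → dy ≤ mxy →
    cs.foldl stepB ⟨dx, dy, mnx, mxx, mny, mxy⟩ =
      ⟨dx + (extS cs).x, dy + (extS cs).y, min mnx (dx + (extS cs).mnx),
       max mxx (dx + (extS cs).mxx), min mny (dy + (extS cs).mny),
       max mxy (dy + (extS cs).mxy)⟩ := by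
  induction cs with
  | nil =>
    intro dx dy mnx mxx mny mxy h1 h2 h3 h4
    simp [extS, BState.mk.injEq] <;> omega
  | cons c cs ih =>
    intro dx dy mnx mxx mny mxy h1 h2 h3 h4
    have hb := ext_bounds cs
    rw [List.foldl_cons, stepB_eq,
      ih (dx + (moving 0 0 c).1) (dy + (moving 0 0 c).2)
        (min mnx (dx + (moving 0 0 c).1)) (max mxx (dx + (moving 0 0 c).1))
        (min mny (dy + (moving 0 0 c).2)) (max mxy (dy + (moving 0 0 c).2))
        (by omega) (by omega) (by omega) (by omega)]
    simp only [extS, BState.mk.injEq]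
    omega

theorem escapes_iff (rowNum columnNum : Int) (cs : List Char) : ∀ x y : Int,
    0 ≤ x → x < rowNum → 0 ≤ y → y < columnNum →
    (escapes rowNum columnNum x y cs = false ↔
      0 ≤ x + (extS cs).mnx ∧ x + (extS cs).mxx < rowNum ∧
      0 ≤ y + (extS cs).mny ∧ y + (extS cs).mxy < columnNum) := by
  induction cs with
  | nil => intro x y h1 h2 h3 h4; simp [escapes, extS]; omega
  | cons c cs ih =>
    intro x y h1 h2 h3 h4
    have hb := ext_bounds cs
    simp only [escapes]
    rw [moving_delta x y c]
    by_cases h : ¬(0 ≤ x + (moving 0 0 c).1 ∧ x + (moving 0 0 c).1 < rowNum) ∨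
        ¬(0 ≤ y + (moving 0 0 c).2 ∧ y + (moving 0 0 c).2 < columnNum)
    · rw [if_pos h]
      simp only [extS]
      constructor
      · intro hfalse; exact absurd hfalse (by decide)
      · intro hr; exfalso; omega
    · rw [not_or, not_not, not_not] at h
      rw [if_neg (not_or.mpr ⟨not_not.mpr h.1, not_not.mpr h.2⟩),
        ih (x + (moving 0 0 c).1) (y + (moving 0 0 c).2) h.1.1 h.1.2 h.2.1 h.2.2]
      simp only [extS]
      omega

theorem countP_range_int (n : ℕ) (lo hi : Int) (h0 : 0 ≤ lo) :
    ((((List.range n).map (fun k : ℕ => (k : Int))).countP fun k =>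
        decide (lo ≤ k ∧ k ≤ hi)) : Int)
      = max 0 (min hi ((n : Int) - 1) - lo + 1) := by
  induction n with
  | zero => simp; omega
  | succ n ih =>
    rw [List.range_succ, List.map_append, List.countP_append]
    by_cases h : lo ≤ (n : Int) ∧ (n : Int) ≤ hi
    · simp only [List.map_cons, List.map_nil, List.countP_cons, List.countP_nil,
        decide_eq_true_eq, h, and_self, if_true]
      push_cast
      rw [ih]
      push_cast
      omega
    · simp only [List.map_cons, List.map_nil, List.countP_cons, List.countP_nil,
        decide_eq_true_eq]
      rw [if_neg h]
      push_cast
      rw [ih]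
      push_cast
      omega

theorem sum_map_ite (l : List Int) (p : Int → Prop) [DecidablePred p] (u v : Int) :
    (l.map (fun r => if p r then u else v)).sum
      = ((l.countP fun r => decide (p r)) : Int) * u
        + (((l.length : Int)) - (l.countP fun r => decide (p r))) * v := by
  induction l with
  | nil => simp
  | cons a l ih =>
    by_cases h : p a <;> simp [h, List.countP_cons, ih] <;> push_cast <;> ring

-- The core count identity: A's double loop counts exactly total − safeRows·safeCols.
theorem count_eq (rowNum columnNum : Int) (L : List Char) :
    ((PySem.List.pyRange 0 rowNum 1).foldl (fun cnt row =>
      (PySem.List.pyRange 0 columnNum 1).foldl (fun cnt col =>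
        if escapes rowNum columnNum row col L then cnt + 1 else cnt) cnt) (0 : Int))
    = max rowNum 0 * max columnNum 0
      - max 0 (max rowNum 0 - ((extS L).mxx - (extS L).mnx))
        * max 0 (max columnNum 0 - ((extS L).mxy - (extS L).mny)) := by
  have hb := ext_bounds L
  have h1 := PySem.List.foldl_congr_mem (PySem.List.pyRange 0 rowNum 1)
    (fun cnt row => (PySem.List.pyRange 0 columnNum 1).foldl (fun cnt col =>
        if escapes rowNum columnNum row col L then cnt + 1 else cnt) cnt)
    (fun cnt row => cnt + (((PySem.List.pyRange 0 columnNum 1).countP fun col =>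
        decide (¬(0 ≤ row + (extS L).mnx ∧ row + (extS L).mxx < rowNum ∧
          0 ≤ col + (extS L).mny ∧ col + (extS L).mxy < columnNum))) : Int))
    (0 : Int)
    (by
      intro acc row hrow
      beta_reduce
      have hr := (PySem.List.mem_pyRange_one).1 hrow
      have h2 := PySem.List.foldl_congr_mem (PySem.List.pyRange 0 columnNum 1)
        (fun cnt col => if escapes rowNum columnNum row col L then cnt + 1 else cnt)
        (fun cnt col => if ¬(0 ≤ row + (extS L).mnx ∧ row + (extS L).mxx < rowNum ∧
            0 ≤ col + (extS L).mny ∧ col + (extS L).mxy < columnNum)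
          then cnt + 1 else cnt)
        acc
        (by
          intro acc2 col hcol
          beta_reduce
          have hc := (PySem.List.mem_pyRange_one).1 hcol
          have hiff := escapes_iff rowNum columnNum L row col (by omega) (by omega)
            (by omega) (by omega)
          by_cases hP : 0 ≤ row + (extS L).mnx ∧ row + (extS L).mxx < rowNum ∧
              0 ≤ col + (extS L).mny ∧ col + (extS L).mxy < columnNum
          · rw [hiff.mpr hP, if_neg (not_not.mpr hP)]
            simp
          · have hE : escapes rowNum columnNum row col L = true := by
              cases hEq : escapes rowNum columnNum row col L
              · exact absurd (hiff.mp hEq) hP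
              · rfl
            rw [hE, if_pos rfl, if_pos hP])
      rw [h2, PySem.List.foldl_ite_add_one])
  rw [h1, PySem.List.foldl_add]
  have hSc : (((PySem.List.pyRange 0 columnNum 1).countP fun col =>
        decide (0 ≤ col + (extS L).mny ∧ col + (extS L).mxy < columnNum)) : Int)
      = max 0 (max columnNum 0 - ((extS L).mxy - (extS L).mny)) := by
    rw [PySem.List.pyRange_one]
    simp only [zero_add]
    rw [List.countP_congr (q := fun col =>
        decide ((-(extS L).mny) ≤ col ∧ col ≤ columnNum - 1 - (extS L).mxy))
      (fun x _ => by simp only [decide_eq_true_eq]; omega)]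
    rw [countP_range_int _ _ _ (by omega)]
    omega
  have hSr : (((PySem.List.pyRange 0 rowNum 1).countP fun row =>
        decide (0 ≤ row + (extS L).mnx ∧ row + (extS L).mxx < rowNum)) : Int)
      = max 0 (max rowNum 0 - ((extS L).mxx - (extS L).mnx)) := by
    rw [PySem.List.pyRange_one]
    simp only [zero_add]
    rw [List.countP_congr (q := fun row =>
        decide ((-(extS L).mnx) ≤ row ∧ row ≤ rowNum - 1 - (extS L).mxx))
      (fun x _ => by simp only [decide_eq_true_eq]; omega)]
    rw [countP_range_int _ _ _ (by omega)]
    omega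
  have hrowval := List.map_congr_left (l := PySem.List.pyRange 0 rowNum 1)
    (f := fun row => (((PySem.List.pyRange 0 columnNum 1).countP fun col =>
        decide (¬(0 ≤ row + (extS L).mnx ∧ row + (extS L).mxx < rowNum ∧
          0 ≤ col + (extS L).mny ∧ col + (extS L).mxy < columnNum))) : Int))
    (g := fun row =>
        if (0 ≤ row + (extS L).mnx ∧ row + (extS L).mxx < rowNum)
        then ((PySem.List.pyRange 0 columnNum 1).length : Int)
          - max 0 (max columnNum 0 - ((extS L).mxy - (extS L).mny))
        else ((PySem.List.pyRange 0 columnNum 1).length : Int))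
    (by
      intro row hrow
      beta_reduce
      by_cases hR : 0 ≤ row + (extS L).mnx ∧ row + (extS L).mxx < rowNum
      · rw [if_pos hR, ← hSc]
        have hsplit := List.countP_congr
          (p := fun col => decide (¬(0 ≤ row + (extS L).mnx ∧ row + (extS L).mxx < rowNum ∧
            0 ≤ col + (extS L).mny ∧ col + (extS L).mxy < columnNum)))
          (q := fun col => decide (¬(0 ≤ col + (extS L).mny ∧ col + (extS L).mxy < columnNum)))
          (l := PySem.List.pyRange 0 columnNum 1)
          (fun x _ => by simp only [decide_eq_true_eq]; omega)
        rw [hsplit]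
        have hlen := List.length_eq_countP_add_countP
          (fun col => decide (0 ≤ col + (extS L).mny ∧ col + (extS L).mxy < columnNum))
          (l := PySem.List.pyRange 0 columnNum 1)
        have hcompl := List.countP_congr
          (p := fun col => decide (¬(0 ≤ col + (extS L).mny ∧ col + (extS L).mxy < columnNum)))
          (q := fun a => decide ¬(decide (0 ≤ a + (extS L).mny ∧ a + (extS L).mxy < columnNum)) = true)
          (l := PySem.List.pyRange 0 columnNum 1)
          (fun x _ => by simp)
        omega
      · rw [if_neg hR]
        have hall : ((PySem.List.pyRange 0 columnNum 1).countP fun col =>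
              decide (¬(0 ≤ row + (extS L).mnx ∧ row + (extS L).mxx < rowNum ∧
                0 ≤ col + (extS L).mny ∧ col + (extS L).mxy < columnNum)))
            = (PySem.List.pyRange 0 columnNum 1).length := by
          rw [List.countP_eq_length]
          intro col _
          simp only [decide_eq_true_eq]
          intro hc
          exact hR ⟨hc.1, hc.2.1⟩
        omega)
  rw [hrowval,
    sum_map_ite _ (fun row => 0 ≤ row + (extS L).mnx ∧ row + (extS L).mxx < rowNum),
    hSr]
  have hlenR : ((PySem.List.pyRange 0 rowNum 1).length : Int) = max rowNum 0 := by
    rw [PySem.List.length_pyRange_one]; omega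
  have hlenC : ((PySem.List.pyRange 0 columnNum 1).length : Int) = max columnNum 0 := by
    rw [PySem.List.length_pyRange_one]; omega
  rw [hlenR, hlenC]
  ring

theorem isRobotSafe_A_val (rowNum columnNum : Int) (string : String) :
    isRobotSafe rowNum columnNum string
      = decide (max rowNum 0 * max columnNum 0
        - max 0 (max rowNum 0 - ((extS string.toList).mxx - (extS string.toList).mnx))
          * max 0 (max columnNum 0 - ((extS string.toList).mxy - (extS string.toList).mny))
        ≠ rowNum * columnNum) := by
  simp only [isRobotSafe]
  rw [count_eq]
  by_cases h : (max rowNum 0 * max columnNum 0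
      - max 0 (max rowNum 0 - ((extS string.toList).mxx - (extS string.toList).mnx))
        * max 0 (max columnNum 0 - ((extS string.toList).mxy - (extS string.toList).mny)))
      = rowNum * columnNum <;> simp [h]

theorem isRobotSafe_B_val (rowNum columnNum : Int) (string : String) :
    isRobotSafe_alt rowNum columnNum string
      = decide ((extS string.toList).mxx - (extS string.toList).mnx < rowNum ∧
          (extS string.toList).mxy - (extS string.toList).mny < columnNum) := by
  simp only [isRobotSafe_alt]
  rw [foldl_stepB string.toList 0 0 0 0 0 0 le_rfl le_rfl le_rfl le_rfl]
  have hb := ext_bounds string.toList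
  simp only [zero_add]
  have e1 : min (0 : Int) (extS string.toList).mnx = (extS string.toList).mnx := by omega
  have e2 : max (0 : Int) (extS string.toList).mxx = (extS string.toList).mxx := by omega
  have e3 : min (0 : Int) (extS string.toList).mny = (extS string.toList).mny := by omega
  have e4 : max (0 : Int) (extS string.toList).mxy = (extS string.toList).mxy := by omega
  rw [e1, e2, e3, e4]

-- ===== VERDICT (by name: the statement is the Claim_ definition above) =====
theorem isRobotSafe_spec : Claim_equal_isRobotSafe := by
  intro rowNum columnNum string _ hPre
  obtain ⟨hr0, hc0⟩ := hPre
  unfold Spec_isRobotSafe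
  rw [isRobotSafe_A_val, isRobotSafe_B_val, decide_eq_decide]
  have hb := ext_bounds string.toList
  set a := (extS string.toList).mxx - (extS string.toList).mnx with ha
  set b := (extS string.toList).mxy - (extS string.toList).mny with hbdef
  have ha0 : 0 ≤ a := by omega
  have hb0 : 0 ≤ b := by omega
  by_cases hr : 0 < rowNum
  · by_cases hc : 0 < columnNum
    · have hR : max rowNum 0 = rowNum := by omega
      have hC : max columnNum 0 = columnNum := by omega
      rw [hR, hC]
      by_cases hs : a < rowNum ∧ b < columnNum
      · have h1 : max 0 (rowNum - a) = rowNum - a := by omega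
        have h2 : max 0 (columnNum - b) = columnNum - b := by omega
        rw [h1, h2]
        have hpos : 0 < (rowNum - a) * (columnNum - b) :=
          mul_pos (by omega) (by omega)
        constructor
        · intro _; exact hs
        · intro _; omega
      · constructor
        · intro hne; exfalso
          rcases not_and_or.mp hs with h | h
          · have h1 : max 0 (rowNum - a) = 0 := by omega
            rw [h1] at hne; simp at hne
          · have h2 : max 0 (columnNum - b) = 0 := by omega
            rw [h2] at hne; simp at hne
        · intro hcontra; exact absurd hcontra hs
    · -- columnNum = 0
      have hC : max columnNum 0 = 0 := by omega
      have hSC : max 0 ((0 : Int) - b) = 0 := by omega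
      have hc0' : columnNum = 0 := by omega
      rw [hC, hSC, hc0', mul_zero]
      simp only [mul_zero, sub_zero, ne_eq, not_true_eq_false, false_iff, not_and]
      intro _; omega
  · -- rowNum = 0
    have hR : max rowNum 0 = 0 := by omega
    rw [hR]
    have hSR0 : max 0 ((0 : Int) - a) = 0 := by omega
    have hr0' : rowNum = 0 := by omega
    rw [hSR0, hr0', zero_mul]
    simp only [zero_mul, zero_sub, neg_zero, ne_eq, not_true_eq_false, false_iff, not_and]
    intro h; exfalso; omega
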